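-- pv_equiv track=rewrite | github.com/DivK-dev04/Python-Traniee | python_training.py/List_sequence.py/win_lose.py | find_longest_streak
-- ===== SOURCE A (Python) =====
-- def find_longest_streak(r):
--     max_streak = 0  # Keeps track of the longest streak
--     current_streak = 1  # Keeps track of the current streak (starts at 1)
--     longest_char = r[0]  # Stores the character with the longest streak
--
--     for i in range(1, len(r)):
--         if r[i] == r[i - 1]:
--             current_streak += 1  # If the current element is the same as the previous, increase streak
--         else:
--             # If a new streak is starting, check if the current streak is the longest so far
--             if current_streak > max_streak:
--                 max_streak = current_streak
--                 longest_char = r[i - 1]  # Set the character that has the longest streak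
--             current_streak = 1  # Reset the current streak
--
--     # Final check after loop to account for the last streak
--     if current_streak > max_streak:
--         max_streak = current_streak
--         longest_char = r[-1]  # Set the character for the last streak
--
--     return longest_char, max_streak
-- ===== SOURCE B (Python) =====
-- def find_longest_streak(r):
--     # Staged: compute run-start boundaries by index arithmetic, diff them into
--     # run lengths, then argmax (first maximum) to pick the winning run.
--     n = len(r)
--     starts = [i for i in range(n) if i == 0 or r[i] != r[i - 1]]
--     lengths = [b - a for a, b in zip(starts, starts[1:] + [n])]
--     m = max(lengths)
--     k = lengths.index(m)
--     return r[starts[k]], m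
-- ===== Notes on version B (the rewrite author's own statement) =====
-- stated objective: alternative
-- what changed: B replaces A's inline streak-counter state machine with staged passes: it first collects the indices where a new run starts, differences consecutive boundaries into a list of run lengths, then returns the element at the start of the first run of maximal length via max/index.
import Mathlib
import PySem

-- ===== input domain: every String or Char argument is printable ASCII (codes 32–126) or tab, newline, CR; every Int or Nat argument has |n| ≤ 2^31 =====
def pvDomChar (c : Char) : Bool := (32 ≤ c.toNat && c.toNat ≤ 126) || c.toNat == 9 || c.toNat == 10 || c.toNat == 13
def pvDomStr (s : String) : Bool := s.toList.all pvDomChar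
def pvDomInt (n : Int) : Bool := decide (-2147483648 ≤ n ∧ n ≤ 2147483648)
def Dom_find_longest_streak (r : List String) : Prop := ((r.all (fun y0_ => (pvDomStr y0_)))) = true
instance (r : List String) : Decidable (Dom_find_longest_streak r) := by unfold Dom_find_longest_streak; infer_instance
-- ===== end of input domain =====

-- B replaces A's inline streak-counter state machine with staged passes (boundary
-- indices, differenced into run lengths, then argmax); same O(n) cost, alternative algorithm.


-- ===== PORT A =====
-- Port of A: the index loop 'for i in range(1, len(r))' comparing r[i] with r[i-1]
-- is rendered as the obvious structural recursion carrying prev = r[i-1];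
-- the state (max_streak, current_streak, longest_char) is A's state unchanged.
def pvALoop (prev : String) (maxs cur : Int) (lc : String) : List String → String × Int
  | [] => if cur > maxs then (prev, cur) else (lc, maxs)   -- final check after the loop; r[-1] = prev
  | x :: xs =>
      if x = prev then pvALoop x maxs (cur + 1) lc xs
      else if cur > maxs then pvALoop x cur 1 prev xs
      else pvALoop x maxs 1 lc xs

def find_longest_streak (r : List String) : String × Int :=
  match r with
  | [] => ("", 0)            -- A raises IndexError on r[0]; excluded by Pre_
  | h :: t => pvALoop h 0 1 h t

-- ===== PORT B =====
-- B-side helper: the comprehension 'starts = [i for i in range(n) if i == 0 or r[i] != r[i-1]]'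
def pvStarts (r : List String) : List Int :=
  (PySem.List.pyRange 0 (r.length : Int) 1).filter
    (fun i => i == 0 || PySem.List.pyGet? r i != PySem.List.pyGet? r (i - 1))

-- B-side helper: 'lengths = [b - a for a, b in zip(starts, starts[1:] + [n])]'
def pvLengths (starts : List Int) (n : Int) : List Int :=
  (starts.zip (starts.drop 1 ++ [n])).map (fun p => p.2 - p.1)

def find_longest_streak_alt (r : List String) : String × Int :=
  match PySem.List.max? (pvLengths (pvStarts r) (r.length : Int)) (fun x => x) with
  | none => ("", 0)          -- max([]) raises ValueError (only for r = []); excluded by Pre_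
  | some m =>
    match PySem.List.index? (pvLengths (pvStarts r) (r.length : Int)) m with
    | none => ("", 0)        -- lengths.index(m): unreachable, m ∈ lengths
    | some k =>
      match PySem.List.pyGet? (pvStarts r) (k : Int) with
      | none => ("", 0)      -- starts[k]: unreachable, k < len(starts)
      | some s =>
        match PySem.List.pyGet? r s with
        | none => ("", 0)    -- r[starts[k]]: unreachable, a valid index
        | some c => (c, m)

-- ===== PRECONDITION & SPEC =====
-- Pre_ excludes only the empty list, where A raises IndexError (r[0]) and B raises ValueError (max of []).
def Pre_find_longest_streak (r : List String) : Prop := r ≠ []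
instance (r : List String) : Decidable (Pre_find_longest_streak r) := by unfold Pre_find_longest_streak; infer_instance
def pvWitness_find_longest_streak : List String := ["a", "a", "b"]
def Spec_find_longest_streak (r : List String) (out : String × Int) : Prop := out = find_longest_streak_alt r
instance (r : List String) (out : String × Int) : Decidable (Spec_find_longest_streak r out) := by unfold Spec_find_longest_streak; infer_instance

-- ===== CLAIM (what is proved, stated in full; the proofs are below) =====
def Claim_equal_find_longest_streak : Prop := ∀ (r : List String), Dom_find_longest_streak r → Pre_find_longest_streak r → Spec_find_longest_streak r (find_longest_streak r)

-- ===== LEMMAS AND PROOFS =====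

-- A's result as a fold of a "keep the strictly better run" step over the run decomposition.
def pvBest (b g : String × Int) : String × Int := if g.2 > b.2 then g else b

def pvRuns (c : String) (k : Int) : List String → List (String × Int)
  | [] => [(c, k)]
  | x :: xs => if x = c then pvRuns c (k + 1) xs else (c, k) :: pvRuns x 1 xs

theorem pvALoop_eq_fold (xs : List String) : ∀ (prev : String) (maxs cur : Int) (lc : String),
    pvALoop prev maxs cur lc xs = (pvRuns prev cur xs).foldl pvBest (lc, maxs) := by
  induction xs with
  | nil =>
      intro prev maxs cur lc
      simp [pvALoop, pvRuns, pvBest]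
  | cons x xs ih =>
      intro prev maxs cur lc
      by_cases hx : x = prev
      · simp [pvALoop, pvRuns, hx, ih]
      · by_cases hc : cur > maxs <;>
          simp [pvALoop, pvRuns, hx, hc, ih, pvBest]

-- Nat-valued mirror of the run decomposition, and its structure lemmas.
def pvRunsN (c : String) (k : Nat) : List String → List (String × Nat)
  | [] => [(c, k)]
  | x :: xs => if x = c then pvRunsN c (k + 1) xs else (c, k) :: pvRunsN x 1 xs

theorem pvRuns_eq_map (t : List String) : ∀ (c : String) (k : Nat),
    pvRuns c (k : Int) t = (pvRunsN c k t).map (fun p => (p.1, (p.2 : Int))) := by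
  induction t with
  | nil => intro c k; simp [pvRuns, pvRunsN]
  | cons x xs ih =>
      intro c k
      by_cases hx : x = c
      · have := ih c (k + 1)
        simp [pvRuns, pvRunsN, hx, ← this]
      · have := ih x 1
        simp [pvRuns, pvRunsN, hx, ← this]

theorem pvRunsN_ne_nil (t : List String) (c : String) (k : Nat) : pvRunsN c k t ≠ [] := by
  induction t generalizing c k with
  | nil => simp [pvRunsN]
  | cons x xs ih => by_cases hx : x = c <;> simp [pvRunsN, hx, ih]

theorem pvRunsN_pos (t : List String) : ∀ (c : String) (k : Nat), 1 ≤ k →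
    ∀ p ∈ pvRunsN c k t, 1 ≤ p.2 := by
  induction t with
  | nil => intro c k hk p hp; simp [pvRunsN] at hp; subst hp; exact hk
  | cons x xs ih =>
      intro c k hk p hp
      by_cases hx : x = c
      · exact ih c (k + 1) (by omega) p (by simpa [pvRunsN, hx] using hp)
      · simp [pvRunsN, hx] at hp
        rcases hp with h | h
        · subst h; exact hk
        · exact ih x 1 le_rfl p h

def pvFlat (rs : List (String × Nat)) : List String := rs.flatMap (fun p => List.replicate p.2 p.1)

theorem pvFlat_runs (t : List String) : ∀ (c : String) (k : Nat),
    pvFlat (pvRunsN c k t) = List.replicate k c ++ t := by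
  induction t with
  | nil => intro c k; simp [pvFlat, pvRunsN]
  | cons x xs ih =>
      intro c k
      by_cases hx : x = c
      · subst hx
        show pvFlat (if x = x then pvRunsN x (k + 1) xs else (x, k) :: pvRunsN x 1 xs) = _
        rw [if_pos rfl, ih x (k + 1), List.replicate_succ']
        simp
      · simp [pvRunsN, hx, pvFlat] at ih ⊢
        simp [ih x 1]

def pvSum (rs : List (String × Nat)) : Nat := (rs.map Prod.snd).sum

theorem pvFlat_length (rs : List (String × Nat)) : (pvFlat rs).length = pvSum rs := by
  induction rs with
  | nil => simp [pvFlat, pvSum]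
  | cons p rs ih => simp only [pvFlat, pvSum, List.flatMap_cons, List.length_append, List.length_replicate, List.map_cons, List.sum_cons] at ih ⊢; omega

-- The boundary comprehension, in Nat form, and its bridge to the port's Int form.
def pvPredN (r : List String) (j : Nat) : Bool := j == 0 || r[j]? != r[j - 1]?

def pvStartsN (r : List String) : List Nat := (List.range r.length).filter (pvPredN r)

theorem range_filter_zero (k : Nat) (hk : 1 ≤ k) :
    (List.range k).filter (fun j => j == 0) = [0] := by
  induction k with
  | zero => omega
  | succ k ih =>
      rw [List.range_succ, List.filter_append]
      cases Nat.eq_zero_or_pos k with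
      | inl h => subst h; simp
      | inr h =>
          rw [ih h]
          have : (List.filter (fun j => j == 0) [k]) = [] := by
            simp; omega
          rw [this, List.append_nil]

theorem pvStarts_eq_map (r : List String) :
    pvStarts r = (pvStartsN r).map Int.ofNat := by
  rw [pvStarts, pvStartsN, PySem.List.pyRange_one]
  have h1 : (((r.length : Int)) - 0).toNat = r.length := by omega
  rw [h1, List.filter_map]
  have h2 : ∀ j ∈ List.range r.length,
      ((fun i : Int => i == 0 || PySem.List.pyGet? r i != PySem.List.pyGet? r (i - 1)) ∘
        (fun k : Nat => (0 : Int) + k)) j = pvPredN r j := by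
    intro j _
    cases j with
    | zero => simp [pvPredN]
    | succ j' =>
        simp only [Function.comp_apply, pvPredN]
        have e0 : (0 : Int) + ((j' + 1 : Nat) : Int) = ((j' : Int)) + 1 := by push_cast; ring
        have e1 : ((j' : Int)) + 1 - 1 = ((j' : Nat) : Int) := by ring
        rw [e0, e1]
        have e2 : ((j' : Int)) + 1 = ((j' + 1 : Nat) : Int) := by push_cast; ring
        rw [e2, PySem.List.pyGet?_natCast, PySem.List.pyGet?_natCast]
        have e3 : (((j' + 1 : Nat) : Int) == 0) = false := by
          rw [beq_eq_false_iff_ne]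
          omega
        have e4 : ((j' + 1 : Nat) == 0) = false := by simp
        rw [e3, e4, Nat.add_sub_cancel]
  rw [List.filter_congr h2]
  have e5 : (fun k : Nat => (0 : Int) + k) = fun j : Nat => (j : Int) := by
    funext k
    omega
  rw [e5]
  generalize List.filter (pvPredN r) (List.range r.length) = l
  induction l with
  | nil => rfl
  | cons y ys ih => simp [List.flatMap_cons, ih, Int.ofNat_eq_natCast]

def pvStartsOfN (o : Nat) : List (String × Nat) → List Nat
  | [] => []
  | p :: rs => o :: pvStartsOfN (o + p.2) rs

theorem pvStartsOfN_shift (rs : List (String × Nat)) : ∀ (o : Nat),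
    pvStartsOfN o rs = (pvStartsOfN 0 rs).map (· + o) := by
  induction rs with
  | nil => intro o; simp [pvStartsOfN]
  | cons p rs ih =>
      intro o
      rw [pvStartsOfN, pvStartsOfN, ih (o + p.2), ih (0 + p.2)]
      simp [List.map_map]
      intro a _; omega

-- One run step of the boundary comprehension.
theorem pvStartsN_step (k : Nat) (hk : 1 ≤ k) (c : String) (rest : List String)
    (hne : ∀ x, rest.head? = some x → x ≠ c) :
    pvStartsN (List.replicate k c ++ rest) = 0 :: (pvStartsN rest).map (· + k) := by
  have hlen : (List.replicate k c ++ rest).length = k + rest.length := by simp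
  rw [pvStartsN, hlen, List.range_add, List.filter_append]
  have part1 : (List.range k).filter (pvPredN (List.replicate k c ++ rest)) = [0] := by
    rw [List.filter_congr (q := fun j => j == 0) ?_, range_filter_zero k hk]
    intro j hj
    have hjk : j < k := List.mem_range.mp hj
    cases j with
    | zero => simp [pvPredN]
    | succ j' =>
        have g1 : (List.replicate k c ++ rest)[j' + 1]? = some c := by
          rw [List.getElem?_append_left (by simpa using hjk)]
          simp [List.getElem?_replicate, hjk]
        have g2 : (List.replicate k c ++ rest)[j']? = some c := by
          rw [List.getElem?_append_left (by simp; omega)]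
          simp [List.getElem?_replicate]; omega
        simp [pvPredN, g1, g2]
  have part2 : ((List.range rest.length).map (fun i => k + i)).filter
      (pvPredN (List.replicate k c ++ rest)) = (pvStartsN rest).map (· + k) := by
    rw [List.filter_map, pvStartsN]
    have hcong : ∀ j ∈ List.range rest.length,
        (pvPredN (List.replicate k c ++ rest) ∘ (fun i => k + i)) j = pvPredN rest j := by
      intro j hj
      have hjm : j < rest.length := List.mem_range.mp hj
      cases j with
      | zero =>
          obtain ⟨x, hx⟩ : ∃ x, rest[0]? = some x := by
            cases rest with
            | nil => simp at hjm
            | cons y ys => exact ⟨y, rfl⟩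
          have hxc : x ≠ c := by
            apply hne
            cases rest with
            | nil => simp at hjm
            | cons y ys => simpa using hx
          have g1 : (List.replicate k c ++ rest)[k + 0]? = some x := by
            rw [Nat.add_zero, List.getElem?_append_right (by simp)]
            simpa using hx
          have hlt : k + 0 - 1 < k := by omega
          have g2 : (List.replicate k c ++ rest)[k + 0 - 1]? = some c := by
            rw [List.getElem?_append_left (by simpa using hlt)]
            rw [List.getElem?_replicate]
            simp
            omega
          simp only [Function.comp_apply, pvPredN, g1, g2]
          simp [hxc]
      | succ j' =>
          have g1 : (List.replicate k c ++ rest)[k + (j' + 1)]? = rest[j' + 1]? := by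
            rw [List.getElem?_append_right (by simp)]
            simp
          have g2 : (List.replicate k c ++ rest)[k + (j' + 1) - 1]? = rest[j']? := by
            have e : k + (j' + 1) - 1 = k + j' := by omega
            rw [e, List.getElem?_append_right (by simp)]
            simp
          simp only [Function.comp_apply, pvPredN, g1, g2]
          have : (k + (j' + 1) == 0) = false := by simp
          rw [this]
          simp
    rw [List.filter_congr hcong]
    congr 1
    funext j
    omega
  rw [part1, part2]
  rfl

theorem pvStartsN_runs (t : List String) : ∀ (c : String) (k : Nat), 1 ≤ k →
    pvStartsN (List.replicate k c ++ t) = pvStartsOfN 0 (pvRunsN c k t) := by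
  induction t with
  | nil =>
      intro c k hk
      have hs := pvStartsN_step k hk c [] (by simp)
      rw [List.append_nil] at hs
      rw [List.append_nil, hs]
      show _ = pvStartsOfN 0 [(c, k)]
      simp [pvStartsN, pvStartsOfN]
  | cons x xs ih =>
      intro c k hk
      by_cases hx : x = c
      · subst hx
        have e : List.replicate k x ++ x :: xs = List.replicate (k + 1) x ++ xs := by
          rw [List.replicate_succ', List.append_assoc]
          rfl
        rw [e, ih x (k + 1) (by omega), pvRunsN, if_pos rfl]
      · rw [pvStartsN_step k hk c (x :: xs) (by intro y hy; simp at hy; subst hy; exact hx)]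
        have h1 : pvStartsN (x :: xs) = pvStartsOfN 0 (pvRunsN x 1 xs) := by
          have := ih x 1 le_rfl
          simpa using this
        rw [h1, pvRunsN, if_neg hx, pvStartsOfN, pvStartsOfN_shift]
        simp only [Nat.add_zero, Nat.zero_add, List.cons.injEq, true_and, List.map_id_fun', List.map_id']
        exact (pvStartsOfN_shift (pvRunsN x 1 xs) k).symm

-- Differencing consecutive boundaries yields the run lengths.
theorem pvDiffs (rs : List (String × Nat)) : ∀ (o : Nat), rs ≠ [] →
    (((pvStartsOfN o rs).map Int.ofNat).zip
        (((pvStartsOfN o rs).map Int.ofNat).drop 1 ++ [Int.ofNat (o + pvSum rs)])).map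
      (fun p => p.2 - p.1) = rs.map (fun p => (p.2 : Int)) := by
  induction rs with
  | nil => intro o h; simp at h
  | cons p rs ih =>
      intro o _
      cases rs with
      | nil =>
          have h0 : pvStartsOfN o [p] = [o] := rfl
          simp [h0, pvSum]
      | cons q rs' =>
          have htail := ih (o + p.2) (by simp)
          rw [pvStartsOfN]
          have hhead : pvStartsOfN (o + p.2) (q :: rs') = (o + p.2) :: pvStartsOfN (o + p.2 + q.2) rs' := rfl
          rw [hhead]
          simp only [List.map_cons, List.drop_succ_cons, List.drop_zero, List.cons_append,
            List.zip_cons_cons, List.map_cons, List.cons.injEq]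
          constructor
          · simp [Int.ofNat_eq_natCast]
          · have e : Int.ofNat (o + pvSum (p :: q :: rs')) = Int.ofNat ((o + p.2) + pvSum (q :: rs')) := by
              simp [pvSum, Int.ofNat_eq_natCast]; push_cast; ring
            rw [e]
            rw [hhead] at htail
            simpa using htail

-- The element at the start of run k is run k's character.
theorem pvGet_start (rs : List (String × Nat)) : ∀ (o : Nat) (pre : List String),
    pre.length = o → (∀ p ∈ rs, 1 ≤ p.2) → ∀ (k : Nat), k < rs.length →
    ∃ s, (pvStartsOfN o rs)[k]? = some s ∧
      (pre ++ pvFlat rs)[s]? = some ((rs[k]?.map Prod.fst).getD "") := by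
  induction rs with
  | nil => intro o pre _ _ k hk; simp at hk
  | cons p rs ih =>
      intro o pre hlen hpos k hk
      cases k with
      | zero =>
          refine ⟨o, rfl, ?_⟩
          have h2 : 1 ≤ p.2 := hpos p (by simp)
          have hfl : pvFlat (p :: rs) = List.replicate p.2 p.1 ++ pvFlat rs := by
            simp [pvFlat, List.flatMap_cons]
          rw [hfl, ← hlen]
          rw [List.getElem?_append_right (le_refl _), Nat.sub_self]
          rw [List.getElem?_append_left (by simpa using h2)]
          rw [List.getElem?_replicate]
          simp [h2]
          omega
      | succ k' =>
          have : pvFlat (p :: rs) = List.replicate p.2 p.1 ++ pvFlat rs := by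
            simp [pvFlat, List.flatMap_cons]
          rw [this, ← List.append_assoc]
          have hlen' : (pre ++ List.replicate p.2 p.1).length = o + p.2 := by simp [hlen]
          obtain ⟨s, hs1, hs2⟩ := ih (o + p.2) (pre ++ List.replicate p.2 p.1) hlen'
            (fun q hq => hpos q (by simp [hq])) k' (by simpa using hk)
          exact ⟨s, by simpa [pvStartsOfN] using hs1, by simpa using hs2⟩

-- foldl max algebra
theorem foldl_max_max (l : List Int) : ∀ (a b : Int),
    l.foldl max (max a b) = max a (l.foldl max b) := by
  induction l with
  | nil => intro a b; rfl
  | cons x l ih =>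
      intro a b
      simp only [List.foldl_cons]
      rw [max_assoc, ih]

theorem fold_best_le (runs : List (String × Int)) : ∀ (acc : String × Int),
    (∀ p ∈ runs, p.2 ≤ acc.2) → runs.foldl pvBest acc = acc := by
  induction runs with
  | nil => intro acc _; rfl
  | cons p rs ih =>
      intro acc h
      have hp : p.2 ≤ acc.2 := h p (by simp)
      have : pvBest acc p = acc := by simp [pvBest]; omega
      simp only [List.foldl_cons, this]
      exact ih acc (fun q hq => h q (by simp [hq]))

-- The first-maximum characterisation of the fold.
theorem fold_best_max (runs : List (String × Int)) : ∀ (m : Int) (acc : String × Int),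
    PySem.List.max? (runs.map Prod.snd) (fun x => x) = some m → acc.2 < m →
    ∃ (k : Nat) (hk : k < runs.length),
      PySem.List.index? (runs.map Prod.snd) m = some k ∧
      runs.foldl pvBest acc = runs[k] ∧ runs[k].2 = m := by
  induction runs with
  | nil =>
      intro m acc hm _
      rw [List.map_nil] at hm
      rw [(PySem.List.max?_eq_none_iff [] (fun x => x)).mpr rfl] at hm
      exact absurd hm (by simp)
  | cons p rs ih =>
      intro m acc hm hacc
      rw [List.map_cons, PySem.List.max?_id_cons] at hm
      have hm' : (rs.map Prod.snd).foldl max p.2 = m := by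
        injection hm
      cases rs with
      | nil =>
          have hmp : m = p.2 := by simpa using hm'.symm
          refine ⟨0, by simp, ?_, ?_, by simpa using hmp.symm⟩
          · rw [List.map_cons, List.map_nil, hmp]
            exact PySem.List.index?_cons_self _ _
          · have : pvBest acc p = p := by
              simp only [pvBest]
              rw [if_pos (by omega)]
            simp [this]
      | cons q rs' =>
          have hm2 : PySem.List.max? ((q :: rs').map Prod.snd) (fun x => x) =
              some ((rs'.map Prod.snd).foldl max q.2) := by
            rw [List.map_cons, PySem.List.max?_id_cons]
          have hmm : m = max p.2 ((rs'.map Prod.snd).foldl max q.2) := by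
            rw [← hm', List.map_cons, List.foldl_cons, foldl_max_max]
          by_cases hcase : (rs'.map Prod.snd).foldl max q.2 ≤ p.2
          · have hmp : m = p.2 := by rw [hmm]; exact max_eq_left hcase
            refine ⟨0, by simp, ?_, ?_, by simp [hmp]⟩
            · rw [List.map_cons, hmp]
              exact PySem.List.index?_cons_self _ _
            · have hstep : pvBest acc p = p := by
                simp only [pvBest]
                rw [if_pos (by omega)]
              rw [List.foldl_cons, hstep]
              refine (fold_best_le (q :: rs') p ?_).trans (by simp)
              intro y hy
              have hy2 : y.2 ∈ (q :: rs').map Prod.snd := List.mem_map_of_mem hy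
              have := PySem.List.max?_isMax hm2 y.2 hy2
              simpa using le_trans this hcase
          · push_neg at hcase
            have hmp : m = (rs'.map Prod.snd).foldl max q.2 := by
              rw [hmm]; exact max_eq_right (le_of_lt hcase)
            have hpne : p.2 ≠ m := by omega
            have hacc' : (pvBest acc p).2 < m := by
              simp only [pvBest]
              split_ifs <;> omega
            obtain ⟨k', hk', hidx', hfold', hval'⟩ :=
              ih m (pvBest acc p) (by rw [hm2, ← hmp]) hacc'
            refine ⟨k' + 1, by simpa using Nat.succ_lt_succ hk', ?_, ?_, by simpa using hval'⟩
            · rw [List.map_cons, PySem.List.index?_cons_of_ne _ hpne, hidx']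
              rfl
            · rw [List.foldl_cons]
              simpa using hfold'

-- ===== VERDICT (by name: the statement is the Claim_ definition above) =====
theorem find_longest_streak_spec : Claim_equal_find_longest_streak := by
  intro r _ hpre
  unfold Spec_find_longest_streak
  match r with
  | [] => exact absurd rfl hpre
  | h :: t =>
    have hone : List.replicate 1 h ++ t = h :: t := by simp
    have hpos := pvRunsN_pos t h 1 le_rfl
    have hnil : pvRunsN h 1 t ≠ [] := pvRunsN_ne_nil t h 1
    have hflat : pvFlat (pvRunsN h 1 t) = h :: t := by rw [pvFlat_runs t h 1, hone]
    have hlen : (h :: t).length = pvSum (pvRunsN h 1 t) := by rw [← hflat, pvFlat_length]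
    have hSN : pvStartsN (h :: t) = pvStartsOfN 0 (pvRunsN h 1 t) := by
      rw [← hone]
      exact pvStartsN_runs t h 1 le_rfl
    have hstarts : pvStarts (h :: t) = (pvStartsOfN 0 (pvRunsN h 1 t)).map Int.ofNat := by
      rw [pvStarts_eq_map, hSN]
    have hL : pvLengths (pvStarts (h :: t)) (((h :: t).length : Nat) : Int) =
        (pvRunsN h 1 t).map (fun p => (p.2 : Int)) := by
      rw [hstarts, pvLengths]
      have hnn : (((h :: t).length : Nat) : Int) = Int.ofNat (0 + pvSum (pvRunsN h 1 t)) := by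
        rw [hlen]
        simp [Int.ofNat_eq_natCast]
      rw [hnn]
      exact pvDiffs (pvRunsN h 1 t) 0 hnil
    -- A's loop as the fold over the runs
    have hA : find_longest_streak (h :: t) =
        ((pvRunsN h 1 t).map (fun p => (p.1, (p.2 : Int)))).foldl pvBest (h, 0) := by
      show pvALoop h 0 1 h t = _
      rw [pvALoop_eq_fold]
      have h1 : (1 : Int) = ((1 : Nat) : Int) := rfl
      rw [h1, pvRuns_eq_map t h 1]
    have hmapsnd : ((pvRunsN h 1 t).map (fun p => (p.1, (p.2 : Int)))).map Prod.snd =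
        (pvRunsN h 1 t).map (fun p => (p.2 : Int)) := by
      rw [List.map_map]
      rfl
    obtain ⟨m, hmax⟩ : ∃ m, PySem.List.max? ((pvRunsN h 1 t).map (fun p => (p.2 : Int)))
        (fun x => x) = some m := by
      cases hc : PySem.List.max? ((pvRunsN h 1 t).map (fun p => (p.2 : Int))) (fun x => x) with
      | none =>
          have := (PySem.List.max?_eq_none_iff _ _).mp hc
          simp [hnil] at this
      | some m => exact ⟨m, rfl⟩
    have hmpos : (0 : Int) < m := by
      have hmem := PySem.List.max?_mem hmax
      simp only [List.mem_map] at hmem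
      obtain ⟨p, hp, hpm⟩ := hmem
      have h1 := hpos p hp
      omega
    obtain ⟨k, hk, hidx, hfold, hval⟩ :=
      fold_best_max ((pvRunsN h 1 t).map (fun p => (p.1, (p.2 : Int)))) m (h, 0)
        (by rw [hmapsnd]; exact hmax) hmpos
    have hklen : k < (pvRunsN h 1 t).length := by simpa using hk
    obtain ⟨s, hs1, hs2⟩ := pvGet_start (pvRunsN h 1 t) 0 [] rfl hpos k hklen
    have hs2' : (h :: t)[s]? = some ((pvRunsN h 1 t)[k].1) := by
      rw [List.nil_append, hflat] at hs2
      rw [hs2, List.getElem?_eq_getElem hklen]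
      simp
    have hg1 : PySem.List.pyGet? (pvStarts (h :: t)) (k : Int) = some (Int.ofNat s) := by
      rw [hstarts, PySem.List.pyGet?_natCast, List.getElem?_map, hs1]
      rfl
    have hg2 : PySem.List.pyGet? (h :: t) (Int.ofNat s) = some ((pvRunsN h 1 t)[k].1) := by
      rw [Int.ofNat_eq_natCast, PySem.List.pyGet?_natCast, hs2']
    have hidx' : PySem.List.index? ((pvRunsN h 1 t).map (fun p => (p.2 : Int))) m = some k := by
      rw [← hmapsnd]
      exact hidx
    rw [find_longest_streak_alt, hL, hmax]
    simp only []
    rw [hidx']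
    simp only []
    rw [hg1]
    simp only []
    rw [hg2]
    simp only []
    rw [hA, hfold]
    have : ((pvRunsN h 1 t).map (fun p => (p.1, (p.2 : Int))))[k]'hk =
        (((pvRunsN h 1 t)[k]).1, (((pvRunsN h 1 t)[k]).2 : Int)) := by
      rw [List.getElem_map]
    rw [this]
    have hval' : (((pvRunsN h 1 t)[k]).2 : Int) = m := by
      rw [← hval, this]
    rw [hval']
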